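-- pv_equiv track=rewrite | github.com/AstridMocanu/Python_labs | python_lab3/ex6.py | list_statistics
-- ===== SOURCE A (Python) =====
-- def list_statistics(listt):
--
--
--     s=set(listt)
--     l=listt.copy()
--
--     for elem in s:
--         listt.remove(elem)
--     a=len(l)-len(s)
--     b=len(s)
--     return a,b
-- ===== SOURCE B (Python) =====
-- def list_statistics(listt):
--     # Single O(n) pass: classify each element as first occurrence (-> seen)
--     # or repeat (-> remaining); mutate listt in place like A does.
--     seen = set()
--     remaining = []
--     for x in listt:
--         if x in seen:
--             remaining.append(x)
--         else:
--             seen.add(x)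
--     listt[:] = remaining
--     return len(remaining), len(seen)
-- ===== Notes on version B (the rewrite author's own statement) =====
-- stated objective: faster
-- what changed: Replaced A's set() build plus a per-distinct-element listt.remove() loop (each remove is a linear scan) by one linear pass that maintains a seen set and collects repeats, then slice-assigns listt and returns (len(remaining), len(seen)).
import Mathlib
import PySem

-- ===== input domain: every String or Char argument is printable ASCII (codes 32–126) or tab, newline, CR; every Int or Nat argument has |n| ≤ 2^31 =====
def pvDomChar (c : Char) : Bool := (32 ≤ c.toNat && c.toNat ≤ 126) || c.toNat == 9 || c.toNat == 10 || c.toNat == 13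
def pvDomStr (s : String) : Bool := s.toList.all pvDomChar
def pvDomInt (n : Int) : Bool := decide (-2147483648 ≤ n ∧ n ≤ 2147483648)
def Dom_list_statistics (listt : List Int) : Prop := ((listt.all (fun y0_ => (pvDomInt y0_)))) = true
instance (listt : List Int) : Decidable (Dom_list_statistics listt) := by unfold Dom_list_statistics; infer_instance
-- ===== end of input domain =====

-- B replaces A's set build + O(n*k) remove loop with one O(n) classifying pass (faster).
-- Both Pythons mutate listt in place the same way; the equivalence proved here is about the RETURN value.

-- ===== PORT A =====
-- A: s = set(listt); l = listt.copy(); for elem in s: listt.remove(elem)  (mutation only,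
-- does not reach the return value; Python's hash iteration order over s is not modelled,
-- and the removals do not affect a, b); return (len(l) - len(s), len(s)).
def list_statistics (listt : List Int) : Int × Int :=
  let s : PySem.Set Int := PySem.Set.ofList listt
  let l : List Int := listt
  ((l.length : Int) - (s.length : Int), (s.length : Int))

-- ===== PORT B =====
-- B: one pass keeping (seen, remaining); return (len(remaining), len(seen)).
def list_statistics_alt (listt : List Int) : Int × Int :=
  let p := listt.foldl
    (fun (p : PySem.Set Int × List Int) x =>
      if PySem.Set.contains p.1 x then (p.1, p.2 ++ [x]) else (PySem.Set.add p.1 x, p.2))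
    (PySem.Set.empty, [])
  ((p.2.length : Int), (p.1.length : Int))

-- ===== PRECONDITION & SPEC =====
def Spec_list_statistics (listt : List Int) (out : Int × Int) : Prop := out = list_statistics_alt listt
instance (listt : List Int) (out : Int × Int) : Decidable (Spec_list_statistics listt out) := by unfold Spec_list_statistics; infer_instance

-- ===== CLAIM (what is proved, stated in full; the proofs are below) =====
def Claim_equal_list_statistics : Prop := ∀ (listt : List Int), Dom_list_statistics listt → Spec_list_statistics listt (list_statistics listt)

-- ===== LEMMAS AND PROOFS =====

-- Loop invariant for B's pass: the seen component is Set.update s l, and each step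
-- moves exactly one element to one of the two components.
theorem list_statistics_fold_inv (l : List Int) (s : PySem.Set Int) (r : List Int) :
    (l.foldl
      (fun (p : PySem.Set Int × List Int) x =>
        if PySem.Set.contains p.1 x then (p.1, p.2 ++ [x]) else (PySem.Set.add p.1 x, p.2))
      (s, r)).1 = PySem.Set.update s l ∧
    (l.foldl
      (fun (p : PySem.Set Int × List Int) x =>
        if PySem.Set.contains p.1 x then (p.1, p.2 ++ [x]) else (PySem.Set.add p.1 x, p.2))
      (s, r)).2.length =
      s.length + r.length + l.length -
      (l.foldl
        (fun (p : PySem.Set Int × List Int) x =>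
          if PySem.Set.contains p.1 x then (p.1, p.2 ++ [x]) else (PySem.Set.add p.1 x, p.2))
        (s, r)).1.length := by
  induction l generalizing s r with
  | nil => simp [PySem.Set.update]
  | cons x l ih =>
    simp only [List.foldl_cons]
    by_cases hx : PySem.Set.contains s x
    · rw [if_pos hx]
      have hadd : PySem.Set.add s x = s := by unfold PySem.Set.add; rw [if_pos hx]
      have h := ih s (r ++ [x])
      refine ⟨?_, ?_⟩
      · rw [h.1]; simp only [PySem.Set.update, List.foldl_cons, hadd]
      · rw [h.2]; simp only [List.length_append, List.length_cons, List.length_nil]; omega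
    · rw [if_neg hx]
      have h := ih (PySem.Set.add s x) r
      have hlen : (PySem.Set.add s x).length = s.length + 1 := by
        unfold PySem.Set.add; rw [if_neg hx]; simp
      refine ⟨?_, ?_⟩
      · rw [h.1]; simp only [PySem.Set.update, List.foldl_cons]
      · rw [h.2, hlen]; simp only [List.length_cons]; omega

theorem list_statistics_update_le (l : List Int) (s : PySem.Set Int) :
    (PySem.Set.update s l).length ≤ s.length + l.length := by
  induction l generalizing s with
  | nil => simp [PySem.Set.update]
  | cons x l ih =>
    simp only [PySem.Set.update, List.foldl_cons] at ih ⊢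
    by_cases hx : PySem.Set.contains s x
    · have hadd : PySem.Set.add s x = s := by unfold PySem.Set.add; rw [if_pos hx]
      rw [hadd]
      have h := ih s
      simp only [List.length_cons]; omega
    · have hlen : PySem.Set.add s x = s ++ [x] := by unfold PySem.Set.add; rw [if_neg hx]
      rw [hlen]
      have h := ih (s ++ [x])
      simp only [List.length_append, List.length_cons, List.length_nil] at h ⊢; omega

-- ===== VERDICT (by name: the statement is the Claim_ definition above) =====
theorem list_statistics_spec : Claim_equal_list_statistics := by
  intro listt _
  unfold Spec_list_statistics list_statistics list_statistics_alt
  have h := list_statistics_fold_inv listt PySem.Set.empty []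
  have hle := list_statistics_update_le listt PySem.Set.empty
  have hofList : PySem.Set.update (PySem.Set.empty (α := Int)) listt = PySem.Set.ofList listt := by
    simp [PySem.Set.update, PySem.Set.ofList_eq_foldl, PySem.Set.empty]
  simp only []
  rw [Prod.ext_iff]
  constructor
  · have hle' : (PySem.Set.ofList listt).length ≤ listt.length := by
      rw [← hofList]; simpa [PySem.Set.empty] using hle
    simp only [h.2, h.1, hofList]
    simp [PySem.Set.empty]
    omega
  · rw [h.1, hofList]
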